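-- pv_equiv track=rewrite | github.com/YotsuBotfds/senku-app | bench_artifact_tools.py | _extract_response_from_section
-- ===== SOURCE A (Python) =====
-- SOURCE_HEADERS = (
--     "**Sources:**",
--     "**Retrieved Context (not explicitly cited):**",
-- )
--
-- METADATA_PREFIXES = (
--     "*Section:",
--     "*Decision path:",
--     "*Query decomposed into",
--     "*Generation:",
--     "*Runtime:",
--     "*Retrieval metadata:",
-- )
--
-- def _extract_response_from_section(section_body):
--     """Return just the model response content from one markdown prompt section."""
--     content = section_body
--     for source_header in SOURCE_HEADERS:
--         marker = f"\n{source_header}\n"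
--         if marker in content:
--             content = content.split(marker, 1)[0]
--             break
--
--     lines = []
--     started = False
--     for raw_line in content.splitlines():
--         line = raw_line.rstrip()
--         stripped = line.strip()
--         if not started:
--             if not stripped:
--                 continue
--             if any(stripped.startswith(prefix) for prefix in METADATA_PREFIXES):
--                 continue
--             if stripped.startswith("**ERROR:**"):
--                 return ""
--             started = True
--         lines.append(line)
--
--     return "\n".join(lines).strip()
-- ===== SOURCE B (Python) =====
-- SOURCE_HEADERS = (
--     "**Sources:**",
--     "**Retrieved Context (not explicitly cited):**",
-- )
--
-- METADATA_PREFIXES = (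
--     "*Section:",
--     "*Decision path:",
--     "*Query decomposed into",
--     "*Generation:",
--     "*Runtime:",
--     "*Retrieval metadata:",
-- )
--
--
-- def _is_preamble(line):
--     stripped = line.strip()
--     return not stripped or any(stripped.startswith(p) for p in METADATA_PREFIXES)
--
--
-- def _extract_response_from_section(section_body):
--     content = section_body
--     for header in SOURCE_HEADERS:
--         marker = f"\n{header}\n"
--         if marker in content:
--             content = content.split(marker, 1)[0]
--             break
--
--     lines = [line.rstrip() for line in content.splitlines()]
--     idx = next((i for i, line in enumerate(lines) if not _is_preamble(line)), None)
--     if idx is None: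
--         return ""
--     if lines[idx].strip().startswith("**ERROR:**"):
--         return ""
--     return "\n".join(lines[idx:]).strip()
-- ===== Notes on version B (the rewrite author's own statement) =====
-- stated objective: simpler
-- what changed: B replaces A's stateful flag-and-accumulator loop with a single rstrip map followed by dropping the leading blank/metadata lines (dropwhile/next) and joining the remaining suffix.
import Mathlib
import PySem

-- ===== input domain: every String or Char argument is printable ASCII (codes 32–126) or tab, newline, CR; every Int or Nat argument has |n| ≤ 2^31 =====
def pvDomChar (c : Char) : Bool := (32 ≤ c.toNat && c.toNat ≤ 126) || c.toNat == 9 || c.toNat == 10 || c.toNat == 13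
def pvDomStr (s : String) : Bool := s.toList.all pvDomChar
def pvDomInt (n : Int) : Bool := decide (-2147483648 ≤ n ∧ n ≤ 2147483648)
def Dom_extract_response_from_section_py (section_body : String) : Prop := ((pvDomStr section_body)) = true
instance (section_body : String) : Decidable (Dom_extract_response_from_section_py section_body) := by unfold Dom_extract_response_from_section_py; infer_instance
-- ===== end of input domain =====

-- B changes A's stateful flag-and-accumulator loop into: rstrip every line, drop the leading blank/metadata lines, join the rest (objective: simpler).

def pvSourceHeaders : List String :=
  ["**Sources:**", "**Retrieved Context (not explicitly cited):**"]

def pvMetadataPrefixes : List String :=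
  ["*Section:", "*Decision path:", "*Query decomposed into",
   "*Generation:", "*Runtime:", "*Retrieval metadata:"]

-- ===== PORT A =====
-- A's 'for source_header in SOURCE_HEADERS: … break' loop (split(marker, 1)[0]);
-- the 'match … | _ => content' default is unreachable: marker is never "" so splitMax? is some nonempty
def pvStripFooterA : List String → String → String
  | [], content => content
  | h :: rest, content =>
    let marker := "\n" ++ h ++ "\n"
    if PySem.Str.isIn marker content then
      match PySem.Str.splitMax? content marker 1 with
      | some (p :: _) => p
      | _ => content
    else pvStripFooterA rest content

-- A's main loop; none encodes the early 'return ""' on an **ERROR:** first content line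
def pvLoopA : List String → List String → Bool → Option (List String)
  | [], acc, _ => some acc
  | raw :: rest, acc, started =>
    let line := PySem.Str.rstrip raw
    let stripped := PySem.Str.strip line
    if !started then
      if stripped == "" then pvLoopA rest acc started
      else if pvMetadataPrefixes.any (fun p => PySem.Str.startswith stripped p) then
        pvLoopA rest acc started
      else if PySem.Str.startswith stripped "**ERROR:**" then none
      else pvLoopA rest (acc ++ [line]) true
    else pvLoopA rest (acc ++ [line]) true

def extract_response_from_section_py (section_body : String) : String :=
  let content := pvStripFooterA pvSourceHeaders section_body
  match pvLoopA (PySem.Str.splitlines content) [] false with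
  | none => ""
  | some lines => PySem.Str.strip (PySem.Str.join "\n" lines)

-- ===== PORT B =====
def pvStripFooterB : List String → String → String
  | [], content => content
  | h :: rest, content =>
    let marker := "\n" ++ h ++ "\n"
    if PySem.Str.isIn marker content then
      match PySem.Str.splitMax? content marker 1 with
      | some (p :: _) => p
      | _ => content
    else pvStripFooterB rest content

-- Source B's _is_preamble
def pvIsPreamble (line : String) : Bool :=
  let stripped := PySem.Str.strip line
  stripped == "" || pvMetadataPrefixes.any (fun p => PySem.Str.startswith stripped p)

def extract_response_from_section_py_alt (section_body : String) : String :=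
  let content := pvStripFooterB pvSourceHeaders section_body
  let lines := (PySem.Str.splitlines content).map PySem.Str.rstrip
  match lines.dropWhile pvIsPreamble with
  | [] => ""
  | first :: restLines =>
    if PySem.Str.startswith (PySem.Str.strip first) "**ERROR:**" then ""
    else PySem.Str.strip (PySem.Str.join "\n" (first :: restLines))

-- ===== PRECONDITION & SPEC =====
def Spec_extract_response_from_section_py (section_body : String) (out : String) : Prop := out = extract_response_from_section_py_alt section_body
instance (section_body : String) (out : String) : Decidable (Spec_extract_response_from_section_py section_body out) := by unfold Spec_extract_response_from_section_py; infer_instance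

-- ===== CLAIM (what is proved, stated in full; the proofs are below) =====
def Claim_equal_extract_response_from_section_py : Prop := ∀ (section_body : String), Dom_extract_response_from_section_py section_body → Spec_extract_response_from_section_py section_body (extract_response_from_section_py section_body)

-- ===== LEMMAS AND PROOFS =====

theorem pvStripFooter_eq (hs : List String) (c : String) :
    pvStripFooterA hs c = pvStripFooterB hs c := by
  induction hs with
  | nil => rfl
  | cons h rest ih => simp [pvStripFooterA, pvStripFooterB, ih]

theorem pvLoopA_started (ls acc : List String) :
    pvLoopA ls acc true = some (acc ++ ls.map PySem.Str.rstrip) := by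
  induction ls generalizing acc with
  | nil => simp [pvLoopA]
  | cons raw rest ih => simp [pvLoopA, ih]



-- the shape of A's loop result in terms of B's dropWhile suffix (proof-layer helper)
def pvFinish : List String → Option (List String)
  | [] => some []
  | first :: restLines =>
    if PySem.Str.startswith (PySem.Str.strip first) "**ERROR:**" then none
    else some (first :: restLines)

theorem pvLoopA_dropWhile (ls : List String) :
    pvLoopA ls [] false = pvFinish ((ls.map PySem.Str.rstrip).dropWhile pvIsPreamble) := by
  induction ls with
  | nil => rfl
  | cons raw rest ih =>
    simp only [pvLoopA, List.map_cons, List.dropWhile_cons]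
    rw [if_pos (by decide : (!false) = true)]
    by_cases h1 : (PySem.Str.strip (PySem.Str.rstrip raw) == "") = true
    · have hb : pvIsPreamble (PySem.Str.rstrip raw) = true := by
        simp only [pvIsPreamble, h1, Bool.true_or]
      rw [if_pos h1, if_pos hb]
      exact ih
    · by_cases h2 : (pvMetadataPrefixes.any
          (fun p => PySem.Str.startswith (PySem.Str.strip (PySem.Str.rstrip raw)) p)) = true
      · have hb : pvIsPreamble (PySem.Str.rstrip raw) = true := by
          simp only [pvIsPreamble, h2, Bool.or_true]
        rw [if_neg h1, if_pos h2, if_pos hb]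
        exact ih
      · have hb : pvIsPreamble (PySem.Str.rstrip raw) = false := by
          simp only [pvIsPreamble, Bool.or_eq_false_iff]
          exact ⟨Bool.eq_false_iff.mpr h1, Bool.eq_false_iff.mpr h2⟩
        rw [if_neg h1, if_neg h2,
          if_neg (show ¬ pvIsPreamble (PySem.Str.rstrip raw) = true by simp [hb])]
        simp only [pvFinish]
        simp [pvLoopA_started]

-- ===== VERDICT (by name: the statement is the Claim_ definition above) =====
theorem extract_response_from_section_py_spec : Claim_equal_extract_response_from_section_py := by
  intro s _
  unfold Spec_extract_response_from_section_py extract_response_from_section_py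
    extract_response_from_section_py_alt
  rw [pvStripFooter_eq]
  simp only [pvLoopA_dropWhile]
  cases h : List.dropWhile pvIsPreamble
      (List.map PySem.Str.rstrip (PySem.Str.splitlines (pvStripFooterB pvSourceHeaders s))) with
  | nil => decide
  | cons f r =>
    simp only [pvFinish]
    by_cases he : PySem.Chars.startswith (PySem.Chars.strip f.toList)
        ['*', '*', 'E', 'R', 'R', 'O', 'R', ':', '*', '*'] = true
    · simp [he]
    · simp [he]
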